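-- pv_equiv track=rewrite | github.com/Eastonco/CS355 | Python/HW3.py | sumSales
-- ===== SOURCE A (Python) =====
-- def sumSales(d):
--     totalSales = {}
--     for sales in d.values():
--         for day, price in sales.items():
--             if day in totalSales:
--                 totalSales[day] = (price + totalSales.get(day))
--             else:
--                 totalSales[day] = price
--     return totalSales
-- ===== SOURCE B (Python) =====
-- def sumSales(d):
--     # Pass 1: group every price by day (first-seen day order preserved).
--     groups = {}
--     for sales in d.values():
--         for day, price in sales.items():
--             groups.setdefault(day, []).append(price)
--     # Pass 2: reduce each day's price list (no initializer: start from the first price).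
--     out = {}
--     for day, prices in groups.items():
--         total = prices[0]
--         for p in prices[1:]:
--             total = total + p
--         out[day] = total
--     return out
-- ===== Notes on version B (the rewrite author's own statement) =====
-- stated objective: alternative
-- what changed: Replaces A's single-pass conditional accumulate-into-dict with a two-pass decomposition: first group every price into a per-day list, then reduce each list to its total.
import Mathlib
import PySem

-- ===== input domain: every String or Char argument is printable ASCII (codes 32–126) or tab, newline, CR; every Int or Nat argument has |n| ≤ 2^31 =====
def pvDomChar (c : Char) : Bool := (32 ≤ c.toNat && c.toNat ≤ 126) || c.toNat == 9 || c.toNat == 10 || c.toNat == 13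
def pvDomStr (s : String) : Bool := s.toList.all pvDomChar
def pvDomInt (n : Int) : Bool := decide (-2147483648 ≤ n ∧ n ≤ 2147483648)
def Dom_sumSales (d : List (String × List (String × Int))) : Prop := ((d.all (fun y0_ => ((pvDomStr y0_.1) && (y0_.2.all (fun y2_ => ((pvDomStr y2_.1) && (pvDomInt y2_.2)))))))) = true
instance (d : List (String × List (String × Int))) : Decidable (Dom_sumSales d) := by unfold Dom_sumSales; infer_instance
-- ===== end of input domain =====

-- B is an alternative decomposition of A: one grouping pass (day -> list of prices), then a reduce pass.

-- ===== PORT A =====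
-- A: one dict totalSales, accumulated conditionally per (day, price) pair.
def sumSales (d : List (String × List (String × Int))) : List (String × Int) :=
  (d.foldl
    (fun totalSales kv =>
      kv.2.foldl
        (fun totalSales p =>
          if totalSales.contains p.1 then
            totalSales.insert p.1 (p.2 + totalSales.getD p.1 0)   -- price + totalSales.get(day); the key is present, so 0 is never used
          else
            totalSales.insert p.1 p.2)
        totalSales)
    (PySem.Dict.empty : PySem.Dict String Int)).items

-- ===== PORT B =====
-- Source B's inner reduce loop: total = prices[0]; for p in prices[1:]: total = total + p.
-- groups' value lists are always nonempty, so the [] branch (Python would IndexError) is unreachable.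
def pvReduce (prices : List Int) : Int :=
  match prices with
  | [] => 0
  | total :: rest => rest.foldl (fun total p => total + p) total

def sumSales_alt (d : List (String × List (String × Int))) : List (String × Int) :=
  let groups : PySem.Dict String (List Int) :=
    d.foldl
      (fun groups kv =>
        kv.2.foldl (fun groups p => groups.modify p.1 [] (fun l => l ++ [p.2])) groups)
      PySem.Dict.empty
  groups.items.map (fun pr => (pr.1, pvReduce pr.2))

-- ===== PRECONDITION & SPEC =====
def Spec_sumSales (d : List (String × List (String × Int))) (out : List (String × Int)) : Prop := out = sumSales_alt d
instance (d : List (String × List (String × Int))) (out : List (String × Int)) : Decidable (Spec_sumSales d out) := by unfold Spec_sumSales; infer_instance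

-- ===== CLAIM (what is proved, stated in full; the proofs are below) =====
def Claim_equal_sumSales : Prop := ∀ (d : List (String × List (String × Int))), Dom_sumSales d → Spec_sumSales d (sumSales d)

-- ===== LEMMAS AND PROOFS =====

-- A's conditional step equals an unconditional insert of (price + current total, default 0).
theorem stepA_eq (t : PySem.Dict String Int) (p : String × Int) :
    (if t.contains p.1 then t.insert p.1 (p.2 + t.getD p.1 0) else t.insert p.1 p.2)
      = t.insert p.1 (p.2 + t.getD p.1 0) := by
  by_cases h : t.contains p.1 = true
  · simp [h]
  · have h' : t.contains p.1 = false := by simpa using h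
    rw [PySem.Dict.getD_of_not_contains t (0 : Int) h']
    simp [h']

-- Nested foldl over the sellers list = foldl over the flattened pair list.
theorem foldl_flat {α β : Type} (f : β → String × Int → β) (d : List (α × List (String × Int))) (init : β) :
    d.foldl (fun b kv => kv.2.foldl f b) init = (d.flatMap (·.2)).foldl f init := by
  induction d generalizing init with
  | nil => rfl
  | cons kv rest ih => simp [List.flatMap_cons, List.foldl_append, ih]

-- Value of A's accumulation dict at any key.
theorem getD_foldA (L : List (String × Int)) (t : PySem.Dict String Int) (k : String) :
    (L.foldl (fun t p => t.insert p.1 (p.2 + t.getD p.1 0)) t).getD k 0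
      = t.getD k 0 + ((L.filter (fun p => p.1 == k)).map (·.2)).sum := by
  induction L generalizing t with
  | nil => simp
  | cons p rest ih =>
      simp only [List.foldl_cons, ih, List.filter_cons]
      by_cases h : p.1 = k
      · subst h
        simp [PySem.Dict.getD_insert_self]
        ring
      · rw [PySem.Dict.getD_insert_of_ne _ _ _ (Ne.symm h)]
        simp [h]

-- A left fold of (+) from any seed is the seed plus the sum.
theorem foldl_add_sum (r : List Int) (p : Int) : r.foldl (fun a b => a + b) p = p + r.sum := by
  induction r generalizing p with
  | nil => simp
  | cons x rest ih => simp [List.foldl_cons, ih]; ring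

-- Source B's reduce is the sum (its value lists are built nonempty, and on [] both give 0).
theorem pvReduce_eq_sum (ps : List Int) : pvReduce ps = ps.sum := by
  cases ps with
  | nil => rfl
  | cons p rest => simp [pvReduce, foldl_add_sum]

theorem sumSales_spec_aux (d : List (String × List (String × Int))) :
    sumSales d = sumSales_alt d := by
  unfold sumSales sumSales_alt
  have hstep : (fun (t : PySem.Dict String Int) (p : String × Int) =>
      if t.contains p.1 then t.insert p.1 (p.2 + t.getD p.1 0) else t.insert p.1 p.2)
      = fun t p => t.insert p.1 (p.2 + t.getD p.1 0) := by
    funext t p; exact stepA_eq t p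
  simp only [hstep, foldl_flat]
  set L := d.flatMap (·.2) with hL
  -- both dicts have the same (nodup) key list
  have hkA : (L.foldl (fun t (p : String × Int) => t.insert p.1 (p.2 + t.getD p.1 0))
      (PySem.Dict.empty : PySem.Dict String Int)).keys
      = PySem.Set.update PySem.Dict.empty.keys (L.map (·.1)) :=
    PySem.Dict.keys_foldl_insert_key L (·.1) _ _
  have hkB : (L.foldl (fun g (p : String × Int) => g.modify p.1 [] (fun l => l ++ [p.2]))
      (PySem.Dict.empty : PySem.Dict String (List Int))).keys
      = PySem.Set.update (PySem.Dict.empty : PySem.Dict String (List Int)).keys (L.map (·.1)) :=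
    PySem.Dict.keys_foldl_modify_key L (·.1) [] _ _
  have hnA : (L.foldl (fun t (p : String × Int) => t.insert p.1 (p.2 + t.getD p.1 0))
      (PySem.Dict.empty : PySem.Dict String Int)).keys.Nodup :=
    PySem.Dict.nodup_keys_foldl_insert_key L (·.1) _ _ (by simp)
  have hnB : (L.foldl (fun g (p : String × Int) => g.modify p.1 [] (fun l => l ++ [p.2]))
      (PySem.Dict.empty : PySem.Dict String (List Int))).keys.Nodup :=
    PySem.Dict.nodup_keys_foldl_modify_key L (·.1) [] _ _ (by simp)
  rw [PySem.Dict.items_eq_map_keys _ hnA 0, PySem.Dict.items_eq_map_keys _ hnB []]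
  rw [hkA, hkB, List.map_map]
  apply List.map_congr_left
  intro k _
  simp only [Function.comp]
  rw [getD_foldA, PySem.Dict.getD_foldl_modify_append, pvReduce_eq_sum]
  simp

-- ===== VERDICT (by name: the statement is the Claim_ definition above) =====
theorem sumSales_spec : Claim_equal_sumSales := by
  intro d _
  unfold Spec_sumSales
  exact sumSales_spec_aux d
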